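-- pv_equiv track=rewrite | github.com/sajadtorkamani/python-playground | katas/plastic_balance/solution.py | plastic_balance
-- ===== SOURCE A (Python) =====
-- def plastic_balance(nums: list[int]) -> list[int]:
--     if len(nums) == 1:
--         return nums
--
--     remaining_nums = nums.copy()
--
--     while len(remaining_nums) >= 1:
--         start_num = remaining_nums.pop(0) if len(remaining_nums) > 0 else 0
--         end_num = remaining_nums.pop() if len(remaining_nums) > 0 else 0
--         popped_nums_sum = start_num + end_num
--         remaining_nums_sum = sum(remaining_nums)
--
--         if popped_nums_sum == remaining_nums_sum:
--             return [start_num, *remaining_nums, end_num]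
--
--     return []
-- ===== SOURCE B (Python) =====
-- def plastic_balance(nums: list[int]) -> list[int]:
--     n = len(nums)
--     if n == 1:
--         return nums
--     inner = sum(nums)
--     for k in range(n // 2):
--         outer = nums[k] + nums[n - 1 - k]
--         inner -= outer
--         if outer == inner:
--             return nums[k:n - k]
--     return []
-- ===== Notes on version B (the rewrite author's own statement) =====
-- stated objective: faster
-- what changed: Replaced A's while loop, which copies the list, pops from both ends and re-sums the whole remainder at every layer, by a single indexed pass that keeps a running inner sum (subtracting each popped pair), checking balance in O(1) per layer and returning the slice on a hit.
-- intended difference: On odd-length lists (length >= 3) whose middle element is 0 and where no outer pair balances, A returns the two-element list of the middle element followed by a sentinel zero fabricated by its pop-with-default, while B returns the empty list, the intended 'no balance layer found' answer, since a lone middle element has no outer pair. — e.g. on plastic_balance([5, 0, 5]): A returns [0, 0], B returns []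
import Mathlib
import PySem

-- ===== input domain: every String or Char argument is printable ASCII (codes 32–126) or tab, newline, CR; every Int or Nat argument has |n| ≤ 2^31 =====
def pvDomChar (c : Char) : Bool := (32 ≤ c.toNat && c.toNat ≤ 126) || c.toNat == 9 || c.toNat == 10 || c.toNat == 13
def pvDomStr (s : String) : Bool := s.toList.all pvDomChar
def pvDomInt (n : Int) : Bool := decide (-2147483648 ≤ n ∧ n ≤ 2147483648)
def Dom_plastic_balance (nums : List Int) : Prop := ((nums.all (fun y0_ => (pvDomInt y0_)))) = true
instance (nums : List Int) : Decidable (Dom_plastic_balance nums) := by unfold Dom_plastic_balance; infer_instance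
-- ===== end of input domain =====

-- B replaces A's loop (which copies the list, pops both ends and re-sums the remainder every layer)
-- by one indexed pass with a running inner sum; on odd-length lists whose middle element is 0 and
-- where no outer pair balances, A's value carries a sentinel artifact and B differs — see D_ below.

-- ===== PORT A =====
-- the while loop over the shrinking remaining list; pop(0) → headD/tail, pop() → getLastD/dropLast
def pvALoop (rem : List Int) : List Int :=
  if _h : 1 ≤ rem.length then
    let start := rem.headD 0                                   -- pop(0) if len > 0 else 0
    let rem1 := rem.tail
    let en := if 0 < rem1.length then rem1.getLastD 0 else 0   -- pop() if len > 0 else 0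
    let rem2 := rem1.dropLast
    if start + en = rem2.sum then [start] ++ rem2 ++ [en]
    else pvALoop rem2
  else []
termination_by rem.length
decreasing_by simp only [List.length_dropLast, List.length_tail]; omega

def plastic_balance (nums : List Int) : List Int :=
  if nums.length = 1 then nums else pvALoop nums

-- ===== PORT B =====
-- 'for k in range(n // 2)' with early return, ported as structural recursion over the range list;
-- nums[k] and nums[n-1-k] are in range for every k the loop reaches, so pyGetD with default 0 is exact.
def pvBLoop (nums : List Int) (n : Int) (inner : Int) : List Int → List Int
  | [] => []
  | k :: ks =>
    let outer := PySem.List.pyGetD nums k 0 + PySem.List.pyGetD nums (n - 1 - k) 0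
    let inner' := inner - outer
    if outer = inner' then PySem.List.slice nums (some k) (some (n - k))
    else pvBLoop nums n inner' ks

def plastic_balance_alt (nums : List Int) : List Int :=
  let n : Int := (nums.length : Int)
  if n = 1 then nums
  else pvBLoop nums n nums.sum (PySem.List.pyRange 0 (PySem.Int.floordiv n 2) 1)

-- ===== PRECONDITION & SPEC =====
-- On odd-length lists (length ≥ 3) whose middle element is 0 and where no outer pair sum equals its
-- inner sum, A returns the two-element list of the middle element followed by a sentinel zero fabricated
-- by its pop-with-default, while B returns the empty list, the intended "no balance layer found" answer
-- (a lone middle element has no outer pair).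
-- layer k (the slice nums[k : n-k]) balances iff twice its outer pair sum equals the slice's sum
def D_plastic_balance (nums : List Int) : Prop :=
  3 ≤ nums.length ∧ Odd nums.length ∧ nums.getD (nums.length / 2) 0 = 0 ∧
    ∀ k < nums.length / 2, 2 * (nums.getD k 0 + nums.reverse.getD k 0) ≠
      (nums.drop k).sum - (nums.reverse.take k).sum
instance (nums : List Int) : Decidable (D_plastic_balance nums) := by
  unfold D_plastic_balance; infer_instance

def Spec_plastic_balance (nums : List Int) (out : List Int) : Prop :=
  ¬ D_plastic_balance nums → out = plastic_balance_alt nums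
instance (nums : List Int) (out : List Int) : Decidable (Spec_plastic_balance nums out) := by
  unfold Spec_plastic_balance; infer_instance

def pvDiffWitness_plastic_balance : List Int := [5, 0, 5]
def pvDiffWitnessOut_plastic_balance : (List Int) × (List Int) := ([0, 0], [])

-- ===== CLAIM (what is proved, stated in full; the proofs are below) =====
def Claim_unchanged_plastic_balance : Prop :=
  ∀ (nums : List Int), Dom_plastic_balance nums → Spec_plastic_balance nums (plastic_balance nums)
def Claim_changed_plastic_balance : Prop :=
  Dom_plastic_balance (pvDiffWitness_plastic_balance) ∧
  D_plastic_balance (pvDiffWitness_plastic_balance) ∧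
  plastic_balance (pvDiffWitness_plastic_balance) = pvDiffWitnessOut_plastic_balance.1 ∧
  plastic_balance_alt (pvDiffWitness_plastic_balance) = pvDiffWitnessOut_plastic_balance.2 ∧
  pvDiffWitnessOut_plastic_balance.1 ≠ pvDiffWitnessOut_plastic_balance.2
def Claim_exact_plastic_balance : Prop :=
  ∀ (nums : List Int), Dom_plastic_balance nums → D_plastic_balance nums →
    plastic_balance nums ≠ plastic_balance_alt nums

-- ===== LEMMAS AND PROOFS =====

-- the layer slice nums[k : n-k] and the "layer k balances" condition A's loop tests
def pvSl (nums : List Int) (k : Nat) : List Int := (nums.drop k).take (nums.length - 2*k)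
def pvBal (nums : List Int) (k : Nat) : Prop :=
  nums.getD k 0 + nums.getD (nums.length - 1 - k) 0 = (pvSl nums (k+1)).sum

-- pvSl facts: peeling one layer, the empty final layer (even length), the middle final layer (odd length)
lemma pvSl_step (nums : List Int) (k : Nat) (h : 2*k + 2 ≤ nums.length) :
    pvSl nums k = nums.getD k 0 :: (pvSl nums (k+1) ++ [nums.getD (nums.length - 1 - k) 0]) := by
  have hk : k < nums.length := by omega
  have hlast : nums.length - 1 - k < nums.length := by omega
  unfold pvSl
  rw [List.drop_eq_getElem_cons hk]
  have h2 : nums.length - 2*k = (nums.length - 2*k - 2) + 1 + 1 := by omega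
  rw [h2, List.take_succ_cons, List.take_add_one, List.getElem?_drop]
  have h3 : k + 1 + (nums.length - 2*k - 2) = nums.length - 1 - k := by omega
  rw [h3, List.getElem?_eq_getElem hlast]
  have h4 : nums.length - 2*(k+1) = nums.length - 2*k - 2 := by omega
  rw [h4]
  simp [List.getD_eq_getElem?_getD, hk, hlast]

-- D_'s doubled, reverse-indexed form of the balance condition agrees with the one A tests
lemma pvBal_iff (nums : List Int) (k : Nat) (h : 2*k + 2 ≤ nums.length) :
    (2 * (nums.getD k 0 + nums.reverse.getD k 0) =
      (nums.drop k).sum - (nums.reverse.take k).sum) ↔ pvBal nums k := by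
  have hk : k < nums.length := by omega
  have h1 : nums.reverse.getD k 0 = nums.getD (nums.length - 1 - k) 0 := by
    rw [List.getD_eq_getElem _ _ (by simpa using hk),
        List.getD_eq_getElem _ _ (by omega : nums.length - 1 - k < nums.length),
        List.getElem_reverse]
  have h2 : (nums.reverse.take k).sum = (nums.drop (nums.length - k)).sum := by
    rw [List.take_reverse, List.sum_reverse]
  have h3 : (nums.drop k).sum = (pvSl nums k).sum + (nums.drop (nums.length - k)).sum := by
    conv_lhs => rw [← List.take_append_drop (nums.length - 2*k) (nums.drop k)]
    rw [List.sum_append, List.drop_drop]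
    unfold pvSl
    congr 3
    omega
  have hs := pvSl_step nums k h
  have hsum : (pvSl nums k).sum = nums.getD k 0 + (pvSl nums (k+1)).sum +
      nums.getD (nums.length - 1 - k) 0 := by
    rw [hs]; simp [List.getD_eq_getElem?_getD]; omega
  unfold pvBal
  rw [h1, h2, h3, hsum]
  omega

lemma pvSl_nil (nums : List Int) (k : Nat) (h : nums.length = 2*k) : pvSl nums k = [] := by
  unfold pvSl
  have h1 : nums.length - 2*k = 0 := by omega
  simp [h1]

lemma pvSl_mid (nums : List Int) (k : Nat) (h : nums.length = 2*k + 1) :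
    pvSl nums k = [nums.getD k 0] := by
  have hk : k < nums.length := by omega
  have h1 : nums.length - 2*k = 1 := by omega
  unfold pvSl
  rw [h1, List.drop_eq_getElem_cons hk, List.take_succ_cons, List.take_zero]
  simp [List.getD_eq_getElem?_getD, hk]

-- evaluation lemmas for A's while loop
lemma pvALoop_nil : pvALoop [] = [] := by rw [pvALoop]; simp

lemma pvALoop_single (m : Int) : pvALoop [m] = if m = 0 then [m, 0] else [] := by
  rw [pvALoop]; simp [pvALoop_nil]

lemma pvALoop_step (x y : Int) (mid : List Int) :
    pvALoop (x :: (mid ++ [y])) = if x + y = mid.sum then [x] ++ mid ++ [y] else pvALoop mid := by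
  rw [pvALoop]; simp

lemma pv_slice_eq (nums : List Int) (k : Nat) :
    (h : k ≤ nums.length) →
    PySem.List.slice nums (some (k : Int)) (some ((nums.length : Int) - k)) = pvSl nums k := by
  intro h
  have h1 : ((nums.length : Int) - k) = ((nums.length - k : Nat) : Int) := by omega
  rw [h1, PySem.List.slice_natCast]
  unfold pvSl; congr 1; omega

-- main invariant: from layer k on, as long as the run cannot end in the "middle 0" artifact,
-- A's loop on the layer slice equals B's loop with inner = sum of the slice
lemma pv_main_eq (nums : List Int) (f : Nat) : ∀ (k : Nat), nums.length / 2 = k + f →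
    (¬ (nums.length % 2 = 1 ∧ nums.getD (nums.length / 2) 0 = 0 ∧
        ∀ j, k ≤ j → j < nums.length / 2 → ¬ pvBal nums j)) →
    pvALoop (pvSl nums k) =
      pvBLoop nums (nums.length : Int) ((pvSl nums k).sum)
        (PySem.List.pyRange (k : Int) ((nums.length / 2 : Nat) : Int) 1) := by
  induction f with
  | zero =>
    intro k hk H
    rw [PySem.List.pyRange_one_eq_nil (by omega)]
    by_cases hpar : nums.length % 2 = 1
    · have hmid : nums.length = 2*k + 1 := by omega
      rw [pvSl_mid nums k hmid, pvALoop_single]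
      have hne : nums.getD k 0 ≠ 0 := by
        intro h0
        exact H ⟨hpar, by rw [show nums.length / 2 = k by omega]; exact h0,
          fun j hj1 hj2 => absurd hj2 (by omega)⟩
      rw [if_neg hne]
      simp [pvBLoop]
    · rw [pvSl_nil nums k (by omega), pvALoop_nil]
      simp [pvBLoop]
  | succ f ih =>
    intro k hk H
    have hkn : 2*k + 2 ≤ nums.length := by
      have : k + 1 ≤ nums.length / 2 := by omega
      omega
    have hstep := pvSl_step nums k hkn
    rw [hstep, pvALoop_step]
    rw [PySem.List.pyRange_one_cons (by push_cast; omega)]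
    simp only [pvBLoop]
    have e2 : ((nums.length : Int) - 1 - k) = ((nums.length - 1 - k : Nat) : Int) := by omega
    rw [e2]
    simp only [PySem.List.pyGetD_natCast]
    have scond : (nums.getD k 0 :: (pvSl nums (k+1) ++ [nums.getD (nums.length - 1 - k) 0])).sum -
        (nums.getD k 0 + nums.getD (nums.length - 1 - k) 0) = (pvSl nums (k+1)).sum := by
      simp
    rw [scond]
    split_ifs with hb
    · rw [pv_slice_eq nums k (by omega), hstep]
      simp
    · have harg : ((k : Int) + 1) = ((k + 1 : Nat) : Int) := by push_cast; ring
      rw [harg]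
      apply ih (k+1) (by omega)
      intro ⟨ho, hm, hall⟩
      refine H ⟨ho, hm, fun j hj1 hj2 => ?_⟩
      rcases Nat.eq_or_lt_of_le hj1 with rfl | hlt
      · exact fun hbal => hb (by unfold pvBal at hbal; omega)
      · exact hall j (by omega) hj2

-- inside D_: A's loop reaches the lone middle 0 and returns [0, 0]; B's loop runs out and returns []
lemma pv_main_diff (nums : List Int) (f : Nat) : ∀ (k : Nat), nums.length / 2 = k + f →
    nums.length % 2 = 1 → nums.getD (nums.length / 2) 0 = 0 →
    (∀ j, k ≤ j → j < nums.length / 2 → ¬ pvBal nums j) →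
    pvALoop (pvSl nums k) = [0, 0] ∧
      pvBLoop nums (nums.length : Int) ((pvSl nums k).sum)
        (PySem.List.pyRange (k : Int) ((nums.length / 2 : Nat) : Int) 1) = [] := by
  induction f with
  | zero =>
    intro k hk hodd hmid hall
    rw [PySem.List.pyRange_one_eq_nil (by omega)]
    have hmid' : nums.getD k 0 = 0 := by rw [show k = nums.length / 2 by omega]; exact hmid
    rw [pvSl_mid nums k (by omega), pvALoop_single, if_pos hmid', hmid']
    exact ⟨rfl, rfl⟩
  | succ f ih =>
    intro k hk hodd hmid hall
    have hkn : 2*k + 2 ≤ nums.length := by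
      have : k + 1 ≤ nums.length / 2 := by omega
      omega
    have hstep := pvSl_step nums k hkn
    rw [hstep, pvALoop_step]
    rw [PySem.List.pyRange_one_cons (by push_cast; omega)]
    simp only [pvBLoop]
    have e2 : ((nums.length : Int) - 1 - k) = ((nums.length - 1 - k : Nat) : Int) := by omega
    rw [e2]
    simp only [PySem.List.pyGetD_natCast]
    have scond : (nums.getD k 0 :: (pvSl nums (k+1) ++ [nums.getD (nums.length - 1 - k) 0])).sum -
        (nums.getD k 0 + nums.getD (nums.length - 1 - k) 0) = (pvSl nums (k+1)).sum := by
      simp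
    rw [scond]
    have hb : ¬ pvBal nums k := hall k (le_refl k) (by omega)
    unfold pvBal at hb
    rw [if_neg hb, if_neg hb]
    have harg : ((k : Int) + 1) = ((k + 1 : Nat) : Int) := by push_cast; ring
    rw [harg]
    exact ih (k+1) (by omega) hodd hmid (fun j hj1 hj2 => hall j (by omega) hj2)

-- both top-level functions, rewritten to the loop forms the main lemmas talk about
lemma pv_a_eq (nums : List Int) (h1 : nums.length ≠ 1) :
    plastic_balance nums = pvALoop (pvSl nums 0) := by
  unfold plastic_balance
  rw [if_neg h1]
  congr 1
  unfold pvSl; simp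

lemma pv_alt_eq (nums : List Int) (h1 : nums.length ≠ 1) :
    plastic_balance_alt nums = pvBLoop nums (nums.length : Int) ((pvSl nums 0).sum)
      (PySem.List.pyRange ((0 : Nat) : Int) ((nums.length / 2 : Nat) : Int) 1) := by
  unfold plastic_balance_alt
  rw [if_neg (by omega)]
  have hf : PySem.Int.floordiv ((nums.length : Nat) : Int) 2 = ((nums.length / 2 : Nat) : Int) := by
    rw [show (2 : Int) = ((2 : Nat) : Int) by norm_num, PySem.Int.floordiv_natCast]
  have hs : nums.sum = (pvSl nums 0).sum := by unfold pvSl; simp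
  rw [hf, hs]
  norm_num

-- ===== VERDICT (by name: the statement is the Claim_ definition above) =====
theorem plastic_balance_spec : Claim_unchanged_plastic_balance := by
  intro nums _hdom hnd
  by_cases h1 : nums.length = 1
  · unfold plastic_balance plastic_balance_alt
    rw [if_pos h1, if_pos (by omega)]
  · rw [pv_a_eq nums h1, pv_alt_eq nums h1]
    apply pv_main_eq nums (nums.length / 2) 0 (by omega)
    intro ⟨ho, hm, hall⟩
    refine hnd ⟨by omega, Nat.odd_iff.mpr ho, hm, fun j hj => ?_⟩
    have h2 : 2*j + 2 ≤ nums.length := by omega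
    exact fun he => hall j (by omega) hj ((pvBal_iff nums j h2).mp he)

theorem plastic_balance_changed : Claim_changed_plastic_balance := by
  unfold Claim_changed_plastic_balance
  refine ⟨by decide, by decide, ?_, by decide, by decide⟩
  show plastic_balance [5, 0, 5] = [0, 0]
  unfold plastic_balance
  rw [if_neg (by norm_num), show ([5, 0, 5] : List Int) = 5 :: ([0] ++ [5]) from rfl, pvALoop_step]
  norm_num [pvALoop_single]

theorem plastic_balance_tight : Claim_exact_plastic_balance := by
  intro nums _hdom ⟨h3, hodd', hmid, hall⟩
  have hodd : nums.length % 2 = 1 := Nat.odd_iff.mp hodd'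
  have h1 : nums.length ≠ 1 := by omega
  rw [pv_a_eq nums h1, pv_alt_eq nums h1]
  obtain ⟨ha, hb⟩ := pv_main_diff nums (nums.length / 2) 0 (by omega) hodd hmid
    (fun j hj1 hj2 hbal => hall j hj2 ((pvBal_iff nums j (by omega)).mpr hbal))
  rw [ha, hb]
  simp
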